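-- pv_equiv track=rewrite | github.com/Savio-Miranda/Estrutura-de-Dados-II-UFPA-2025 | pythonMaxmin/maxmin4.py | maxmin4
-- ===== SOURCE A (Python) =====
-- def maxmin4(vector: list, linf: int, lsup: int):
--     """
--     Esta função tem custo 2T(n/2) + O(1), pois divide o vetor em dois
--     a cada recursão. No entanto, resolvendo a recorrência temos que
--     seu custo é linear.
--     """
--     maxmin = [0, 0]
--     if (lsup - linf) <= 1:
--         if vector[linf] < vector[lsup]:
--             maxmin[0] = vector[lsup]
--             maxmin[1] = vector[linf]
--         else:
--             maxmin[0] = vector[linf]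
--             maxmin[1] = vector[lsup]
--     else:
--         meio = (lsup + linf)//2
--         maxmin = maxmin4(vector, linf, meio) # T(n/2)
--         max1 = maxmin[0]
--         min1 = maxmin[1]
--         maxmin = maxmin4(vector, meio + 1, lsup) # T(n/2)
--         max2 = maxmin[0]
--         min2 = maxmin[1]
--
--         if max1 > max2:
--             maxmin[0] = max1
--         else:
--             maxmin[0] = max2
--         if min1 < min2:
--             maxmin[1] = min1
--         else:
--             maxmin[1] = min2
--
--     return maxmin
-- ===== SOURCE B (Python) =====
-- def maxmin4(vector: list, linf: int, lsup: int):
--     cur_max = cur_min = vector[linf]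
--     for i in range(linf + 1, lsup + 1):
--         x = vector[i]
--         if x > cur_max:
--             cur_max = x
--         if x < cur_min:
--             cur_min = x
--     return [cur_max, cur_min]
-- ===== Notes on version B (the rewrite author's own statement) =====
-- stated objective: simpler
-- what changed: Replaced the divide-and-conquer recursion with a single left-to-right scan from linf to lsup maintaining a running max and min.
-- outside the precondition, e.g. on maxmin4([1, 2, 3], 2, 0): A returns [3, 1], B returns [3, 3]
import Mathlib
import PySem

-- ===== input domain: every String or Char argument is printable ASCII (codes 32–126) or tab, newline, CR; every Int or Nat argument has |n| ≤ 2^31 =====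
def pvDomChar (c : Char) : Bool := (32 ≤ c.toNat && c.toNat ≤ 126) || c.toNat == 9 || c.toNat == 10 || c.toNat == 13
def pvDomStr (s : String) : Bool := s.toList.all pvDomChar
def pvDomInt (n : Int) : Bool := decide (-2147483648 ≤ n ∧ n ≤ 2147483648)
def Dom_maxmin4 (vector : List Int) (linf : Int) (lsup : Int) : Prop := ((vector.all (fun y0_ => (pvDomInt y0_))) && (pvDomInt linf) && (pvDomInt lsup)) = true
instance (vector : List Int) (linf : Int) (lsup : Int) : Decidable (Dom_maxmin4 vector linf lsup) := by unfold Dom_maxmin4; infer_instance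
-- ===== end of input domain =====

-- B replaces A's divide-and-conquer recursion by a single left-to-right scan
-- maintaining a running max and min (objective: simpler).
-- Equivalence is about the return value; neither program mutates its arguments.

-- element access vector[i] (Python negative-index rule); inside Pre_ the index
-- is always in range, so the default 0 is never used
def pvGetI (vector : List Int) (i : Int) : Int := (PySem.List.pyGet? vector i).getD 0

-- ===== PORT A =====
def maxmin4 (vector : List Int) (linf : Int) (lsup : Int) : List Int :=
  if lsup - linf ≤ 1 then
    if pvGetI vector linf < pvGetI vector lsup then
      [pvGetI vector lsup, pvGetI vector linf]
    else
      [pvGetI vector linf, pvGetI vector lsup]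
  else
    let meio := PySem.Int.floordiv (lsup + linf) 2
    let mm1 := maxmin4 vector linf meio
    let max1 := (PySem.List.pyGet? mm1 0).getD 0
    let min1 := (PySem.List.pyGet? mm1 1).getD 0
    let mm2 := maxmin4 vector (meio + 1) lsup
    let max2 := (PySem.List.pyGet? mm2 0).getD 0
    let min2 := (PySem.List.pyGet? mm2 1).getD 0
    [if max1 > max2 then max1 else max2,
     if min1 < min2 then min1 else min2]
termination_by (lsup - linf).toNat
decreasing_by
  all_goals
    have h2 := PySem.Int.floordiv_mul_add_mod (lsup + linf) 2
    have h3 : 0 ≤ PySem.Int.mod (lsup + linf) 2 := PySem.Int.mod_nonneg _ (by norm_num)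
    have h4 : PySem.Int.mod (lsup + linf) 2 < 2 := PySem.Int.mod_lt _ (by norm_num)
    omega

-- ===== PORT B =====
def maxmin4_alt (vector : List Int) (linf : Int) (lsup : Int) : List Int :=
  let c0 := pvGetI vector linf
  let p := (PySem.List.pyRange (linf + 1) (lsup + 1) 1).foldl
    (fun (p : Int × Int) i =>
      let x := pvGetI vector i
      ((if x > p.1 then x else p.1), (if x < p.2 then x else p.2)))
    (c0, c0)
  [p.1, p.2]

-- ===== PRECONDITION & SPEC =====
-- Pre_ excludes out-of-range indices (where A raises IndexError) and calls with
-- linf > lsup, a degenerate input outside the function's purpose on which A's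
-- value (max/min of the two endpoints) and B's ([vector[linf]] twice) are both
-- accidental.
def Pre_maxmin4 (vector : List Int) (linf : Int) (lsup : Int) : Prop :=
  -(vector.length : Int) ≤ linf ∧ linf ≤ lsup ∧ lsup < (vector.length : Int)
instance (vector : List Int) (linf : Int) (lsup : Int) : Decidable (Pre_maxmin4 vector linf lsup) := by unfold Pre_maxmin4; infer_instance

def pvWitness_maxmin4 : List Int × Int × Int := ([3, 1, 4, 1, 5], 1, 4)

def Spec_maxmin4 (vector : List Int) (linf : Int) (lsup : Int) (out : List Int) : Prop := out = maxmin4_alt vector linf lsup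
instance (vector : List Int) (linf : Int) (lsup : Int) (out : List Int) : Decidable (Spec_maxmin4 vector linf lsup out) := by unfold Spec_maxmin4; infer_instance

-- ===== CLAIM (what is proved, stated in full; the proofs are below) =====
def Claim_equal_maxmin4 : Prop := ∀ (vector : List Int) (linf : Int) (lsup : Int), Dom_maxmin4 vector linf lsup → Pre_maxmin4 vector linf lsup → Spec_maxmin4 vector linf lsup (maxmin4 vector linf lsup)

-- ===== LEMMAS AND PROOFS =====

-- running max / running min of the segment vector[a..b] (the canonical form
-- both ports are reduced to)
def segMax (vector : List Int) (a b : Int) : Int :=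
  (PySem.List.pyRange (a + 1) (b + 1) 1).foldl
    (fun m i => max m (pvGetI vector i)) (pvGetI vector a)

def segMin (vector : List Int) (a b : Int) : Int :=
  (PySem.List.pyRange (a + 1) (b + 1) 1).foldl
    (fun m i => min m (pvGetI vector i)) (pvGetI vector a)

lemma foldl_pair_split (v : List Int) (l : List Int) (a b : Int) :
    l.foldl (fun (p : Int × Int) i =>
      let x := pvGetI v i
      ((if x > p.1 then x else p.1), (if x < p.2 then x else p.2))) (a, b)
    = (l.foldl (fun m i => max m (pvGetI v i)) a,
       l.foldl (fun m i => min m (pvGetI v i)) b) := by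
  induction l generalizing a b with
  | nil => rfl
  | cons x xs ih =>
    simp only [List.foldl_cons, ih]
    rw [show (if pvGetI v x > a then pvGetI v x else a) = max a (pvGetI v x) from by
          split <;> omega,
        show (if pvGetI v x < b then pvGetI v x else b) = min b (pvGetI v x) from by
          split <;> omega]

-- pull a max / min out of the running fold (the fold's op is 'fun m i => max m (f i)',
-- not bare max, so List.foldl_assoc does not apply directly)
lemma foldl_max_pull (f : Int → Int) (l : List Int) (a x : Int) :
    l.foldl (fun m i => max m (f i)) (max a x) = max a (l.foldl (fun m i => max m (f i)) x) := by
  induction l generalizing x with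
  | nil => rfl
  | cons y ys ih => simp only [List.foldl_cons, max_assoc, ih]

lemma foldl_min_pull (f : Int → Int) (l : List Int) (a x : Int) :
    l.foldl (fun m i => min m (f i)) (min a x) = min a (l.foldl (fun m i => min m (f i)) x) := by
  induction l generalizing x with
  | nil => rfl
  | cons y ys ih => simp only [List.foldl_cons, min_assoc, ih]

lemma alt_eq_seg (v : List Int) (a b : Int) :
    maxmin4_alt v a b = [segMax v a b, segMin v a b] := by
  simp only [maxmin4_alt, segMax, segMin, foldl_pair_split]

lemma segMax_split (v : List Int) (a m b : Int) (h1 : a ≤ m) (h2 : m < b) :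
    segMax v a b = max (segMax v a m) (segMax v (m + 1) b) := by
  unfold segMax
  rw [PySem.List.pyRange_one_append (a + 1) (m + 1) (b + 1) (by omega) (by omega),
      PySem.List.pyRange_one_cons (a := m + 1) (b := b + 1) (by omega),
      List.foldl_append, List.foldl_cons, foldl_max_pull]

lemma segMin_split (v : List Int) (a m b : Int) (h1 : a ≤ m) (h2 : m < b) :
    segMin v a b = min (segMin v a m) (segMin v (m + 1) b) := by
  unfold segMin
  rw [PySem.List.pyRange_one_append (a + 1) (m + 1) (b + 1) (by omega) (by omega),
      PySem.List.pyRange_one_cons (a := m + 1) (b := b + 1) (by omega),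
      List.foldl_append, List.foldl_cons, foldl_min_pull]

lemma pyGet_pair_zero (x y : Int) : (PySem.List.pyGet? [x, y] 0).getD 0 = x := rfl
lemma pyGet_pair_one (x y : Int) : (PySem.List.pyGet? [x, y] 1).getD 0 = y := rfl

lemma a_eq_seg_aux (N : Nat) : ∀ (v : List Int) (a b : Int), a ≤ b → (b - a).toNat = N →
    maxmin4 v a b = [segMax v a b, segMin v a b] := by
  induction N using Nat.strong_induction_on with
  | _ N ih =>
    intro v a b hab hN
    rw [maxmin4]
    by_cases hbase : b - a ≤ 1
    · simp only [if_pos hbase]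
      have : b = a ∨ b = a + 1 := by omega
      rcases this with h | h <;> subst h
      · rw [segMax, segMin, PySem.List.pyRange_one_eq_nil (by omega)]
        simp only [List.foldl_nil]
        rw [if_neg (by omega)]
      · rw [segMax, segMin, show a + 1 + 1 = a + 1 + 1 by rfl,
            PySem.List.pyRange_one_singleton]
        simp only [List.foldl_cons, List.foldl_nil]
        by_cases hlt : pvGetI v a < pvGetI v (a + 1)
        · rw [if_pos hlt]
          simp only [List.cons.injEq, and_true]
          exact ⟨by omega, by omega⟩
        · rw [if_neg hlt]
          simp only [List.cons.injEq, and_true]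
          exact ⟨by omega, by omega⟩
    · simp only [if_neg hbase]
      set m := PySem.Int.floordiv (b + a) 2 with hm
      have hmb : a ≤ m ∧ m < b := by
        have h2 : PySem.Int.floordiv (b + a) 2 * 2 + PySem.Int.mod (b + a) 2 = b + a :=
          PySem.Int.floordiv_mul_add_mod (b + a) 2
        have h3 : 0 ≤ PySem.Int.mod (b + a) 2 := PySem.Int.mod_nonneg _ (by norm_num)
        have h4 : PySem.Int.mod (b + a) 2 < 2 := PySem.Int.mod_lt _ (by norm_num)
        omega
      rw [ih (m - a).toNat (by omega) v a m hmb.1 rfl,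
          ih (b - (m + 1)).toNat (by omega) v (m + 1) b (by omega) rfl,
          pyGet_pair_zero, pyGet_pair_one, pyGet_pair_zero, pyGet_pair_one,
          segMax_split v a m b hmb.1 hmb.2, segMin_split v a m b hmb.1 hmb.2]
      simp only [List.cons.injEq, and_true]
      exact ⟨by omega, by omega⟩

-- ===== VERDICT (by name: the statement is the Claim_ definition above) =====
theorem maxmin4_spec : Claim_equal_maxmin4 := by
  intro v a b _ hpre
  unfold Spec_maxmin4
  rw [a_eq_seg_aux (b - a).toNat v a b hpre.2.1 rfl, alt_eq_seg]
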